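-- pv_equiv track=rewrite | github.com/pranay-gundam/nonlocal-munchkin | Cards.py | stringFormatting
-- ===== SOURCE A (Python) =====
-- def stringFormatting(s):
--     formattedList = []
--     pastCut = 0
--     for index in range(1,len(s)+1):
--         if index % 27 == 0 or index == len(s):
--             sliced = s[pastCut:index]
--             if index < len(s) and s[index].isalpha():
--                 sliced += '-'
--             formattedList.append(sliced)
--             pastCut = index
--     return formattedList
-- ===== SOURCE B (Python) =====
-- def stringFormatting(s):
--     return [s[i:i + 27] + ('-' if i + 27 < len(s) and s[i + 27].isalpha() else '')
--             for i in range(0, len(s), 27)]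
-- ===== Notes on version B (the rewrite author's own statement) =====
-- stated objective: faster
-- what changed: Replaced the per-index loop over all n positions (pastCut accumulator plus a modulo boundary test at every index) by a single comprehension striding directly over the ceil(n/27) chunk start positions with range(0, len(s), 27).
import Mathlib
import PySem

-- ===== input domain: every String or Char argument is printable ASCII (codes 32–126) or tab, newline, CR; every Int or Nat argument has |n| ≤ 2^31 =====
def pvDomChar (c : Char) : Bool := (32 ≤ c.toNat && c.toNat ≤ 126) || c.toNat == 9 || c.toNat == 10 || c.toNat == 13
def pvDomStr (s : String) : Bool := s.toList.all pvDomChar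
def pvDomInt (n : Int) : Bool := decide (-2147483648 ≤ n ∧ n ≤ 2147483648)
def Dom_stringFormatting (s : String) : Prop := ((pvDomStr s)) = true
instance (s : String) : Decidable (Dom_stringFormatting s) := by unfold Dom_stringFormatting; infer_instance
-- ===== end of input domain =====

-- B replaces A's per-index loop (pastCut accumulator, modulo boundary test at every position)
-- by a single stride over the chunk start positions range(0, len(s), 27); same return values.

-- shared helper: `s[i].isalpha()` (both Pythons guard the index, so `none` is unreachable there)
def pyAlphaAt (cs : List Char) (i : Int) : Bool :=
  match PySem.List.pyGet? cs i with
  | some c => PySem.Chars.isalpha c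
  | none => false

-- ===== PORT A =====
def bodyA (cs : List Char) (st : List (List Char) × Int) (index : Int) : List (List Char) × Int :=
  if PySem.Int.mod index 27 = 0 ∨ index = (cs.length : Int) then
    (st.1 ++ [if index < (cs.length : Int) ∧ pyAlphaAt cs index
              then PySem.List.slice cs (some st.2) (some index) ++ ['-']
              else PySem.List.slice cs (some st.2) (some index)], index)
  else st

def stringFormatting (s : String) : List String :=
  (((PySem.List.pyRange 1 ((s.toList.length : Int) + 1)).foldl (bodyA s.toList) ([], 0)).1).map
    String.ofList

-- ===== PORT B =====
def chunkB (cs : List Char) (i : Int) : List Char :=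
  PySem.List.slice cs (some i) (some (i + 27)) ++
    (if i + 27 < (cs.length : Int) ∧ pyAlphaAt cs (i + 27) then ['-'] else [])

def stringFormatting_alt (s : String) : List String :=
  ((PySem.List.pyRange 0 (s.toList.length : Int) 27).map (chunkB s.toList)).map String.ofList

-- ===== PRECONDITION & SPEC =====
def Spec_stringFormatting (s : String) (out : List String) : Prop := out = stringFormatting_alt s
instance (s : String) (out : List String) : Decidable (Spec_stringFormatting s out) := by unfold Spec_stringFormatting; infer_instance

-- ===== CLAIM (what is proved, stated in full; the proofs are below) =====
def Claim_equal_stringFormatting : Prop := ∀ (s : String), Dom_stringFormatting s → Spec_stringFormatting s (stringFormatting s)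

-- ===== LEMMAS AND PROOFS =====

-- common reference shape: the chunk list of `cs`, recursing 27 characters at a time
def chunksSpec (cs : List Char) : List (List Char) :=
  if _h : cs = [] then []
  else
    (cs.take 27 ++ (if 27 < cs.length ∧ pyAlphaAt cs 27 then ['-'] else []))
      :: chunksSpec (cs.drop 27)
termination_by cs.length
decreasing_by
  simp only [List.length_drop]
  have := List.length_pos_iff.mpr _h
  omega

lemma chunksSpec_nil : chunksSpec [] = [] := by simp [chunksSpec]

lemma chunksSpec_cons (cs : List Char) (h : cs ≠ []) :
    chunksSpec cs =
      (cs.take 27 ++ (if 27 < cs.length ∧ pyAlphaAt cs 27 then ['-'] else []))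
        :: chunksSpec (cs.drop 27) := by
  rw [chunksSpec, dif_neg h]

lemma foldl_noop {α β : Type} (f : β → α → β) (l : List α) (st : β)
    (h : ∀ x ∈ l, ∀ s, f s x = s) : l.foldl f st = st := by
  induction l generalizing st with
  | nil => rfl
  | cons a t ih =>
    simp only [List.foldl_cons, h a (by simp)]
    exact ih _ (fun x hx s => h x (by simp [hx]) s)

lemma pyRange27_cons {a b : Int} (h : a < b) :
    PySem.List.pyRange a b 27 = a :: PySem.List.pyRange (a + 27) b 27 := by
  rw [PySem.List.pyRange_of_pos _ _ (by norm_num : (0:Int) < 27),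
      PySem.List.pyRange_of_pos _ _ (by norm_num : (0:Int) < 27)]
  rw [if_pos h]
  by_cases h2 : a + 27 < b
  · rw [if_pos h2]
    have hcount : ((b - a + 27 - 1)/27).toNat = ((b - (a + 27) + 27 - 1)/27).toNat + 1 := by omega
    rw [hcount, List.range_succ_eq_map, List.map_cons, List.map_map]
    refine congrArg₂ _ (by push_cast; ring) (List.map_congr_left fun k _ => ?_)
    simp only [Function.comp_apply, Nat.succ_eq_add_one]
    push_cast
    ring
  · rw [if_neg h2]
    have hcount : ((b - a + 27 - 1)/27).toNat = 1 := by omega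
    rw [hcount]
    simp

lemma pyRange27_nil {a b : Int} (h : b ≤ a) : PySem.List.pyRange a b 27 = [] := by
  rw [PySem.List.pyRange_of_pos _ _ (by norm_num : (0:Int) < 27), if_neg (by omega)]
  simp

lemma pyRange_one_nil {a b : Int} (h : b ≤ a) : PySem.List.pyRange a b = [] := by
  rw [PySem.List.pyRange_of_pos _ _ (by norm_num : (0:Int) < 1), if_neg (by omega)]
  simp

lemma pyAlphaAt_drop (cs : List Char) (p k : Nat) :
    pyAlphaAt (cs.drop p) (k : Int) = pyAlphaAt cs ((p + k : Nat) : Int) := by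
  unfold pyAlphaAt
  rw [PySem.List.pyGet?_natCast, PySem.List.pyGet?_natCast, List.getElem?_drop]

-- the condition "position p+27 exists in cs and holds a letter", seen from cs vs from cs.drop p
lemma condEq (cs : List Char) (p : Nat) :
    (((p + 27 : Nat) : Int) < (cs.length : Int) ∧ pyAlphaAt cs ((p + 27 : Nat) : Int))
      ↔ (27 < (cs.drop p).length ∧ pyAlphaAt (cs.drop p) 27) := by
  rw [show (27 : Int) = ((27 : Nat) : Int) from by norm_num, pyAlphaAt_drop]
  simp only [List.length_drop]
  constructor
  · rintro ⟨h1, h2⟩; exact ⟨by omega, h2⟩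
  · rintro ⟨h1, h2⟩; exact ⟨by exact_mod_cast (by omega : p + 27 < cs.length), h2⟩

-- B's stride map computes chunksSpec, from any start position p
lemma mapB (cs : List Char) : ∀ (fuel p : Nat), cs.length - p ≤ fuel →
    (PySem.List.pyRange (p : Int) (cs.length : Int) 27).map (chunkB cs) = chunksSpec (cs.drop p) := by
  intro fuel
  induction fuel with
  | zero =>
    intro p hf
    rw [pyRange27_nil (by omega), List.drop_eq_nil_of_le (by omega), chunksSpec_nil, List.map_nil]
  | succ m ih =>
    intro p hf
    by_cases hlt : p < cs.length
    · rw [pyRange27_cons (by exact_mod_cast hlt), List.map_cons]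
      have hdrop : cs.drop p ≠ [] := by
        intro hc
        have := congrArg List.length hc
        simp at this
        omega
      rw [chunksSpec_cons _ hdrop]
      have hc27 : ((p : Int) + 27) = ((p + 27 : Nat) : Int) := by push_cast; ring
      congr 1
      · unfold chunkB
        rw [hc27, PySem.List.slice_natCast, show (p + 27 - p) = 27 from by omega]
        by_cases hc : 27 < (cs.drop p).length ∧ pyAlphaAt (cs.drop p) 27
        · rw [if_pos ((condEq cs p).mpr hc), if_pos hc]
        · rw [if_neg (fun hx => hc ((condEq cs p).mp hx)), if_neg hc]
      · rw [hc27, List.drop_drop]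
        exact ih (p + 27) (by omega)
    · rw [pyRange27_nil (by exact_mod_cast (by omega : cs.length ≤ p)),
          List.drop_eq_nil_of_le (by omega), chunksSpec_nil, List.map_nil]

-- inside a 27-block no index triggers A's append
lemma noopA (cs : List Char) (p : Nat) (e : Int) (hmod : p % 27 = 0)
    (he : e ≤ (cs.length : Int)) (hee : e ≤ (p : Int) + 27) :
    ∀ x ∈ PySem.List.pyRange ((p : Int) + 1) e, ∀ st, bodyA cs st x = st := by
  intro x hx st
  rw [PySem.List.mem_pyRange_one] at hx
  unfold bodyA
  rw [PySem.Int.mod_eq_emod_of_pos (by norm_num : (0:Int) < 27)]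
  rw [if_neg]
  rintro (hm | hm) <;> omega

-- A's index loop computes chunksSpec: invariant from any boundary p (p % 27 = 0, p ≤ len)
lemma loopA (cs : List Char) : ∀ (fuel p : Nat) (acc : List (List Char)),
    cs.length - p ≤ fuel → p ≤ cs.length → p % 27 = 0 →
    ((PySem.List.pyRange ((p : Int) + 1) ((cs.length : Int) + 1)).foldl (bodyA cs) (acc, (p : Int))).1
      = acc ++ chunksSpec (cs.drop p) := by
  intro fuel
  induction fuel with
  | zero =>
    intro p acc hf hle hmod
    rw [pyRange_one_nil (by omega), List.foldl_nil,
        List.drop_eq_nil_of_le (by omega), chunksSpec_nil, List.append_nil]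
  | succ m ih =>
    intro p acc hf hle hmod
    by_cases hlt : p < cs.length
    · have hdrop : cs.drop p ≠ [] := by
        intro hc
        have := congrArg List.length hc
        simp at this
        omega
      by_cases h27 : p + 27 ≤ cs.length
      · -- boundary at p + 27, triggered by the modulo test
        rw [PySem.List.pyRange_one_append ((p : Int) + 1) ((p + 27 : Nat) : Int)
              ((cs.length : Int) + 1) (by omega) (by omega),
            List.foldl_append,
            foldl_noop _ _ _ (noopA cs p _ hmod (by omega) (by omega)),
            PySem.List.pyRange_one_cons (by omega : ((p + 27 : Nat) : Int) < (cs.length : Int) + 1),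
            List.foldl_cons]
        have hb : bodyA cs (acc, (p : Int)) ((p + 27 : Nat) : Int) =
            (acc ++ [(cs.drop p).take 27 ++
              (if 27 < (cs.drop p).length ∧ pyAlphaAt (cs.drop p) 27 then ['-'] else [])],
             ((p + 27 : Nat) : Int)) := by
          unfold bodyA
          rw [if_pos (Or.inl (by
            rw [PySem.Int.mod_eq_emod_of_pos (by norm_num : (0:Int) < 27)]
            omega))]
          rw [PySem.List.slice_natCast, show (p + 27 - p) = 27 from by omega]
          by_cases hc : 27 < (cs.drop p).length ∧ pyAlphaAt (cs.drop p) 27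
          · rw [if_pos ((condEq cs p).mpr hc), if_pos hc]
          · rw [if_neg (fun hx => hc ((condEq cs p).mp hx)), if_neg hc]
            simp
        rw [hb, ih (p + 27) _ (by omega) h27 (by omega), chunksSpec_cons _ hdrop,
            List.drop_drop]
        simp
      · -- last partial chunk, triggered by index == len(s)
        rw [PySem.List.pyRange_one_append ((p : Int) + 1) (cs.length : Int)
              ((cs.length : Int) + 1) (by omega) (by omega),
            List.foldl_append,
            foldl_noop _ _ _ (noopA cs p _ hmod (by omega) (by omega)),
            PySem.List.pyRange_one_cons (by omega : (cs.length : Int) < (cs.length : Int) + 1),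
            List.foldl_cons, pyRange_one_nil (by omega), List.foldl_nil]
        unfold bodyA
        rw [if_pos (Or.inr rfl), if_neg (by rintro ⟨h1, -⟩; omega)]
        rw [show ((cs.length : Int)) = ((cs.length : Nat) : Int) from rfl,
            PySem.List.slice_natCast]
        rw [chunksSpec_cons _ hdrop, List.drop_drop,
            List.drop_eq_nil_of_le (by omega : cs.length ≤ p + 27), chunksSpec_nil]
        rw [if_neg (by rintro ⟨h1, -⟩; simp only [List.length_drop] at h1; omega)]
        rw [List.take_of_length_le (by simp), List.take_of_length_le (by simp; omega)]
        simp
    · rw [pyRange_one_nil (by omega), List.foldl_nil,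
          List.drop_eq_nil_of_le (by omega), chunksSpec_nil, List.append_nil]

-- ===== VERDICT (by name: the statement is the Claim_ definition above) =====
theorem stringFormatting_spec : Claim_equal_stringFormatting := by
  intro s _
  unfold Spec_stringFormatting stringFormatting stringFormatting_alt
  have hA := loopA s.toList s.toList.length 0 [] (by omega) (by omega) (by omega)
  have hB := mapB s.toList s.toList.length 0 (by omega)
  simp only [List.drop_zero, Nat.cast_zero, zero_add] at hA hB
  rw [hA, hB]
  simp
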